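/- GENERATED by c/gen_decode.py: decode facts of the image, one per distinct instruction byte string. -/
import UserX.DecodeImage

#decode_all ProgX.Base.Dec
  "0fb6d2"  -- movzx edx,dl
  "48035008"  -- add rdx,QWORD PTR [rax+0x8]
  "4883fe01"  -- cmp rsi,0x1
  "4889ef"  -- mov rdi,rbp
  "48b8ffffffffffffef7f"  -- movabs rax,0x7fefffffffffffff
  "4989f5"  -- mov r13,rsi
  "4c8b042530f01f00"  -- mov r8,QWORD PTR ds:0x1ff030
  "660f2fc5"  -- comisd xmm0,xmm5
  "7356"  -- jae 103b8e
  "7617"  -- jbe 102cdc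
  "81c3fc070000"  -- add ebx,0x7fc
  "ba00000000"  -- mov edx,0x0
  "e827f1ffff"  -- call 100059
  "e8affeffff"  -- call 101200
  "eb05"  -- jmp 10163e
  "f20f100538db0300"  -- movsd xmm0,QWORD PTR [rip+0x3db38]
  "f20f5805b7d70300"  -- addsd xmm0,QWORD PTR [rip+0x3d7b7]
  "f20f59d3"  -- mulsd xmm2,xmm3
  "f20f5e1da7da0300"  -- divsd xmm3,QWORD PTR [rip+0x3daa7]
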